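-- pv_equiv track=rewrite | github.com/osanghyun/coding_study | baekjoon/part3(basic)/1038.py | get_dec
-- ===== SOURCE A (Python) =====
-- def get_dec(num, dec_nums, digit=1):
--     if digit > 10:
--         return
--
--     dec_nums.append(num)
--
--     for i in range(10):
--         if num % 10 > i:
--             get_dec((num * 10) + i, dec_nums, digit=digit + 1)
--
--     return dec_nums
-- ===== SOURCE B (Python) =====
-- def get_dec(num, dec_nums, digit=1):
--     if digit > 10:
--         return None
--     stack = [(num, digit)]
--     while stack:
--         n, d = stack.pop()
--         dec_nums.append(n)
--         if d < 10:
--             for i in range(n % 10 - 1, -1, -1):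
--                 stack.append((n * 10 + i, d + 1))
--     return dec_nums
-- ===== Notes on version B (the rewrite author's own statement) =====
-- stated objective: alternative
-- what changed: Replaces A's recursive DFS (recursion per node with a guarded range(10) scan) by an iterative DFS over an explicit stack of (num, digit) pairs, pushing children in descending order so pops reproduce A's preorder append order.
import Mathlib
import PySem

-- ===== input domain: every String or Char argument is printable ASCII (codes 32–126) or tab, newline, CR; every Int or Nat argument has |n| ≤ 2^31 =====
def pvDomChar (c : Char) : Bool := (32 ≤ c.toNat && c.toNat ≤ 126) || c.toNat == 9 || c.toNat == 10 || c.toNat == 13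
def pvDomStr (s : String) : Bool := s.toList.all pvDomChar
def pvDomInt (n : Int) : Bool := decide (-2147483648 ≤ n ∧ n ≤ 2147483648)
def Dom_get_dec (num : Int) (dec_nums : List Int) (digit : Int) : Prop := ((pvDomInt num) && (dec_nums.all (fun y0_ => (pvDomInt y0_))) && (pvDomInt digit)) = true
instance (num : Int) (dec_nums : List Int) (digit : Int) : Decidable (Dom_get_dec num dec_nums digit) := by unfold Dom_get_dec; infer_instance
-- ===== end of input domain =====

-- B replaces A's recursive DFS by an iterative DFS over an explicit stack of (num, digit) pairs
-- (objective: alternative decomposition, same cost). Both Pythons mutate dec_nums in place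
-- identically (appending the same values in the same order); the equivalence proved here is
-- about the return value.

-- ===== PORT A =====
-- A's recursion is parametrised here by fuel = (11 - digit).toNat, an exact reparametrisation
-- of digit: fuel = 0 ↔ digit > 10 (the early return, which is a mutation no-op for inner calls).
def get_decAuxA : Nat → Int → List Int → List Int
  | 0, _, acc => acc
  | fuel + 1, num, acc =>
      -- dec_nums.append(num); for i in range(10): if num % 10 > i: recurse with digit+1
      (PySem.List.pyRange 0 10 1).foldl
        (fun a i => if num.emod 10 > i then get_decAuxA fuel (num * 10 + i) a else a)
        (acc ++ [num])

def get_dec (num : Int) (dec_nums : List Int) (digit : Int) : Option (List Int) :=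
  if digit > 10 then none
  else some (get_decAuxA ((11 - digit).toNat) num dec_nums)

-- ===== PORT B =====
-- termination measure for the while loop: a stack entry of last digit k weighs 2^k; popping it
-- pushes children of weights 2^0 … 2^(k-1), whose sum 2^k - 1 is below the popped 2^k.
def pvStackWeight (st : List (Int × Int)) : Nat :=
  (st.map (fun p => 2 ^ ((p.1.emod 10).toNat))).sum

-- the while loop of B; the list head is the stack top.  Python pushes children with i
-- descending so that i = 0 ends on top; with head = top that is the ascending range.
def get_decLoop : List (Int × Int) → List Int → List Int
  | [], acc => acc
  | (n, d) :: rest, acc =>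
      if d < 10 then
        get_decLoop (((PySem.List.pyRange 0 (n.emod 10) 1).map (fun i => (n * 10 + i, d + 1))) ++ rest)
          (acc ++ [n])
      else
        get_decLoop rest (acc ++ [n])
  termination_by st _ => pvStackWeight st
  decreasing_by
  · have hk0 : 0 ≤ n.emod 10 := Int.emod_nonneg n (by norm_num)
    have hk9 : n.emod 10 < 10 := Int.emod_lt_of_pos n (by norm_num)
    have key : ∀ i : Int, (n * 10 + i).emod 10 = i.emod 10 := fun i => by
      rw [show n * 10 + i = i + 10 * n by ring]; exact Int.add_mul_emod_self_left i 10 n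
    have e0 : (n * 10).emod 10 = 0 := by have := key 0; simpa using this
    have e1 : (n * 10 + 1).emod 10 = 1 := by rw [key]; decide
    have e2 : (n * 10 + 2).emod 10 = 2 := by rw [key]; decide
    have e3 : (n * 10 + 3).emod 10 = 3 := by rw [key]; decide
    have e4 : (n * 10 + 4).emod 10 = 4 := by rw [key]; decide
    have e5 : (n * 10 + 5).emod 10 = 5 := by rw [key]; decide
    have e6 : (n * 10 + 6).emod 10 = 6 := by rw [key]; decide
    have e7 : (n * 10 + 7).emod 10 = 7 := by rw [key]; decide
    have e8 : (n * 10 + 8).emod 10 = 8 := by rw [key]; decide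
    have h0 : PySem.List.pyRange 0 0 1 = ([] : List Int) := by decide
    have h1 : PySem.List.pyRange 0 1 1 = [(0:Int)] := by decide
    have h2 : PySem.List.pyRange 0 2 1 = [(0:Int),1] := by decide
    have h3 : PySem.List.pyRange 0 3 1 = [(0:Int),1,2] := by decide
    have h4 : PySem.List.pyRange 0 4 1 = [(0:Int),1,2,3] := by decide
    have h5 : PySem.List.pyRange 0 5 1 = [(0:Int),1,2,3,4] := by decide
    have h6 : PySem.List.pyRange 0 6 1 = [(0:Int),1,2,3,4,5] := by decide
    have h7 : PySem.List.pyRange 0 7 1 = [(0:Int),1,2,3,4,5,6] := by decide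
    have h8 : PySem.List.pyRange 0 8 1 = [(0:Int),1,2,3,4,5,6,7] := by decide
    have h9 : PySem.List.pyRange 0 9 1 = [(0:Int),1,2,3,4,5,6,7,8] := by decide
    simp only [pvStackWeight, List.map_append, List.sum_append, List.map_cons, List.sum_cons]
    have hsum : (((PySem.List.pyRange 0 (n.emod 10) 1).map (fun i => (n * 10 + i, d + 1))).map
        (fun p => 2 ^ ((p.1.emod 10).toNat))).sum < 2 ^ ((n.emod 10).toNat) := by
      interval_cases n.emod 10 <;>
        simp [h0,h1,h2,h3,h4,h5,h6,h7,h8,h9,e0,e1,e2,e3,e4,e5,e6,e7,e8]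
    omega
  · simp only [pvStackWeight, List.map_cons, List.sum_cons]
    have : 0 < 2 ^ ((n.emod 10).toNat) := Nat.two_pow_pos _
    omega

def get_dec_alt (num : Int) (dec_nums : List Int) (digit : Int) : Option (List Int) :=
  if digit > 10 then none
  else some (get_decLoop [(num, digit)] dec_nums)

-- ===== PRECONDITION & SPEC =====
def Spec_get_dec (num : Int) (dec_nums : List Int) (digit : Int) (out : Option (List Int)) : Prop := out = get_dec_alt num dec_nums digit
instance (num : Int) (dec_nums : List Int) (digit : Int) (out : Option (List Int)) : Decidable (Spec_get_dec num dec_nums digit out) := by unfold Spec_get_dec; infer_instance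

-- ===== CLAIM (what is proved, stated in full; the proofs are below) =====
def Claim_equal_get_dec : Prop := ∀ (num : Int) (dec_nums : List Int) (digit : Int), Dom_get_dec num dec_nums digit → Spec_get_dec num dec_nums digit (get_dec num dec_nums digit)

-- ===== LEMMAS AND PROOFS =====

-- the guarded fold over range(10) is the unguarded fold over range(k) when 0 ≤ k ≤ 9
lemma fold_range10_guard (k : Int) (hk0 : 0 ≤ k) (hk9 : k ≤ 9)
    (f : List Int → Int → List Int) (X : List Int) :
    (PySem.List.pyRange 0 10 1).foldl (fun a i => if k > i then f a i else a) X
      = (PySem.List.pyRange 0 k 1).foldl f X := by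
  have h0 : PySem.List.pyRange 0 0 1 = ([] : List Int) := by decide
  have h1 : PySem.List.pyRange 0 1 1 = [(0:Int)] := by decide
  have h2 : PySem.List.pyRange 0 2 1 = [(0:Int),1] := by decide
  have h3 : PySem.List.pyRange 0 3 1 = [(0:Int),1,2] := by decide
  have h4 : PySem.List.pyRange 0 4 1 = [(0:Int),1,2,3] := by decide
  have h5 : PySem.List.pyRange 0 5 1 = [(0:Int),1,2,3,4] := by decide
  have h6 : PySem.List.pyRange 0 6 1 = [(0:Int),1,2,3,4,5] := by decide
  have h7 : PySem.List.pyRange 0 7 1 = [(0:Int),1,2,3,4,5,6] := by decide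
  have h8 : PySem.List.pyRange 0 8 1 = [(0:Int),1,2,3,4,5,6,7] := by decide
  have h9 : PySem.List.pyRange 0 9 1 = [(0:Int),1,2,3,4,5,6,7,8] := by decide
  rw [show PySem.List.pyRange 0 10 1 = [0,1,2,3,4,5,6,7,8,9] from by decide]
  interval_cases k <;> simp [h0,h1,h2,h3,h4,h5,h6,h7,h8,h9]

-- a call with digit = 10 (fuel 1) only appends num: every child call is the fuel-0 no-op
lemma get_decAuxA_one (num : Int) (acc : List Int) :
    get_decAuxA 1 num acc = acc ++ [num] := by
  rw [get_decAuxA, show PySem.List.pyRange 0 10 1 = [0,1,2,3,4,5,6,7,8,9] from by decide]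
  simp [get_decAuxA]

-- processing the stack equals folding A's recursion over it (stack digits are all ≤ 10)
lemma get_decLoop_eq_foldl (st : List (Int × Int)) (acc : List Int) :
    (∀ p ∈ st, p.2 ≤ 10) →
      get_decLoop st acc
        = st.foldl (fun a p => get_decAuxA ((11 - p.2).toNat) p.1 a) acc := by
  induction st, acc using get_decLoop.induct with
  | case1 acc => intro _; simp [get_decLoop]
  | case2 n d rest acc hd ih =>
    intro h
    have hk0 : 0 ≤ n.emod 10 := Int.emod_nonneg n (by norm_num)
    have hk9 : n.emod 10 < 10 := Int.emod_lt_of_pos n (by norm_num)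
    have hchild : ∀ p ∈ ((PySem.List.pyRange 0 (n.emod 10) 1).map (fun i => (n * 10 + i, d + 1))) ++ rest, p.2 ≤ 10 := by
      intro p hp
      rcases List.mem_append.mp hp with hp | hp
      · rcases List.mem_map.mp hp with ⟨i, _, rfl⟩; simpa using by omega
      · exact h p (List.mem_cons_of_mem _ hp)
    rw [get_decLoop, if_pos hd, ih hchild, List.foldl_append, List.foldl_map, List.foldl_cons]
    congr 1
    have hm : (11 - d).toNat = (10 - d).toNat + 1 := by omega
    rw [hm, get_decAuxA,
      fold_range10_guard (n.emod 10) hk0 (by omega)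
        (fun a i => get_decAuxA ((10 - d).toNat) (n * 10 + i) a) (acc ++ [n])]
    have : ∀ i : Int, (11 - (d + 1)).toNat = (10 - d).toNat := by intro _; omega
    simp [this 0]
  | case3 n d rest acc hd ih =>
    intro h
    have hd10 : d = 10 := by have := h (n, d) List.mem_cons_self; simp at this; omega
    rw [get_decLoop, if_neg hd, ih (fun p hp => h p (List.mem_cons_of_mem _ hp)), List.foldl_cons]
    subst hd10
    norm_num [get_decAuxA_one]

-- ===== VERDICT (by name: the statement is the Claim_ definition above) =====
theorem get_dec_spec : Claim_equal_get_dec := by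
  intro num dec_nums digit _
  unfold Spec_get_dec get_dec get_dec_alt
  by_cases h : digit > 10
  · simp [h]
  · rw [if_neg h, if_neg h,
      get_decLoop_eq_foldl [(num, digit)] dec_nums (by intro p hp; simp at hp; subst hp; simpa using (by omega : digit ≤ 10))]
    simp
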